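-- pv_equiv track=rewrite | github.com/thumbe12856/competitive-programming | cf/1600 Balance the Bits/solve.py | solve
-- ===== SOURCE A (Python) =====
-- def solve(N, S):
--     ans = []
--     if S[0] == "0" or S[-1] == "0":
--         return ans
--
--     cnt = 0
--     for s in S:
--         if s == "1":
--             cnt += 1
--     if cnt & 1:
--         return ans
--     if cnt == N:
--         s = "(" * (N // 2) + ")" * (N // 2)
--         return [s, s]
--
--     k = 0
--     turn = 0
--     a, b = "", ""
--     for i in range(N):
--         if S[i] == "1":
--             if (k << 1) < cnt:
--                 a += "("
--                 b += "("
--             else: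
--                 a += ")"
--                 b += ")"
--             k += 1
--         else:
--             if turn:
--                 a += "("
--                 b += ")"
--             else:
--                 a += ")"
--                 b += "("
--             turn = 1 - turn
--
--     ans = [a, b]
--     return ans
-- ===== SOURCE B (Python) =====
-- def solve(N, S):
--     if S[0] == "0" or S[-1] == "0":
--         return []
--     cnt = S.count("1")
--     if cnt % 2:
--         return []
--     if cnt == N:
--         s = "(" * (N // 2) + ")" * (N // 2)
--         return [s, s]
--     # gather the index lists, then scatter constant brackets into preallocated arrays
--     ones = [i for i in range(N) if S[i] == "1"]
--     zeros = [i for i in range(N) if S[i] != "1"]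
--     a = [""] * N
--     b = [""] * N
--     h = cnt // 2
--     for i in ones[:h]:
--         a[i] = "("
--         b[i] = "("
--     for i in ones[h:]:
--         a[i] = ")"
--         b[i] = ")"
--     for j, i in enumerate(zeros):
--         if j % 2:
--             a[i] = "("
--             b[i] = ")"
--         else:
--             a[i] = ")"
--             b[i] = "("
--     return ["".join(a), "".join(b)]
-- ===== Notes on version B (the rewrite author's own statement) =====
-- stated objective: alternative
-- what changed: A emits both strings character by character in one stateful left-to-right loop (counters k and turn); B instead gathers the index lists of '1' and non-'1' positions, scatters constant brackets into two preallocated arrays (first half of the ones list gets '(', second half ')', alternating zero positions) and joins them.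
import Mathlib
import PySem

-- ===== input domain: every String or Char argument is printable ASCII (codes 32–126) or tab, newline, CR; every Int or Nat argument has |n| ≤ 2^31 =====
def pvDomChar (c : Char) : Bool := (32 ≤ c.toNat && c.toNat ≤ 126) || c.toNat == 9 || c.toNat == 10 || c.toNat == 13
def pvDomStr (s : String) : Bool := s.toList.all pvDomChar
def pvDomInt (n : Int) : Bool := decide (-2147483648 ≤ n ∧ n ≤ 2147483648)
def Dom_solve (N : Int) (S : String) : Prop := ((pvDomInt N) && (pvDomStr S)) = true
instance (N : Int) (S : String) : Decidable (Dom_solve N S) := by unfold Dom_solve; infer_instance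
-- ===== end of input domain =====

-- B replaces A's single stateful left-to-right emitter (counters k and turn, both strings grown
-- char by char) by a gather/scatter construction: collect the index lists of '1'- and non-'1'
-- positions, then scatter constant brackets into two preallocated arrays (first half of the ones
-- list, second half, and the alternating zero positions) and join (objective: alternative).

-- ===== PORT A =====
-- loop body of A's main for-loop; st = (k, turn, a, b); `k << 1` is `st.1 * 2`; `if turn:` is `st.2.1 ≠ 0`
def solveStepA (L : List Char) (cnt : Int) (st : Int × Int × List Char × List Char) (i : Int) :
    Int × Int × List Char × List Char :=
  if PySem.List.pyGetD L i ' ' = '1' then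
    if st.1 * 2 < cnt then (st.1 + 1, st.2.1, st.2.2.1 ++ ['('], st.2.2.2 ++ ['('])
    else (st.1 + 1, st.2.1, st.2.2.1 ++ [')'], st.2.2.2 ++ [')'])
  else
    if st.2.1 ≠ 0 then (st.1, 1 - st.2.1, st.2.2.1 ++ ['('], st.2.2.2 ++ [')'])
    else (st.1, 1 - st.2.1, st.2.2.1 ++ [')'], st.2.2.2 ++ ['('])

-- `cnt & 1` on the nonnegative count is `cnt % 2 == 1`; S[0]/S[-1] are exact under Pre_ (S nonempty)
def solve (N : Int) (S : String) : List String :=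
  if (PySem.Str.pyGet? S 0).getD ' ' = '0' ∨ (PySem.Str.pyGet? S (-1)).getD ' ' = '0' then []
  else
    let cnt : Int := S.toList.foldl (fun c s => if s = '1' then c + 1 else c) 0
    if PySem.Int.mod cnt 2 = 1 then []
    else if cnt = N then
      let s := String.ofList (List.replicate (PySem.Int.floordiv N 2).toNat '(' ++
                              List.replicate (PySem.Int.floordiv N 2).toNat ')')
      [s, s]
    else
      let r := (PySem.List.pyRange 0 N 1).foldl (solveStepA S.toList cnt) (0, 0, [], [])
      [String.ofList r.2.2.1, String.ofList r.2.2.2]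

-- ===== PORT B =====
def solve_alt (N : Int) (S : String) : List String :=
  if (PySem.Str.pyGet? S 0).getD ' ' = '0' ∨ (PySem.Str.pyGet? S (-1)).getD ' ' = '0' then []
  else
    let cnt : Int := (S.toList.map (fun c => if c = '1' then (1 : Int) else 0)).sum
    if PySem.Int.mod cnt 2 = 1 then []
    else if cnt = N then
      let s := String.ofList (List.replicate (PySem.Int.floordiv N 2).toNat '(' ++
                              List.replicate (PySem.Int.floordiv N 2).toNat ')')
      [s, s]
    else
      let ones := (PySem.List.pyRange 0 N 1).filter (fun i => PySem.List.pyGetD S.toList i ' ' == '1')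
      let zeros := (PySem.List.pyRange 0 N 1).filter (fun i => !(PySem.List.pyGetD S.toList i ' ' == '1'))
      let h := PySem.Int.floordiv cnt 2
      let ab0 := (PySem.List.pyRepeat [""] N, PySem.List.pyRepeat [""] N)
      let ab1 := (PySem.List.slice ones none (some h)).foldl
        (fun st i => (PySem.List.pySetD st.1 i "(", PySem.List.pySetD st.2 i "(")) ab0
      let ab2 := (PySem.List.slice ones (some h) none).foldl
        (fun st i => (PySem.List.pySetD st.1 i ")", PySem.List.pySetD st.2 i ")")) ab1
      let ab3 := (PySem.List.enumerate zeros 0).foldl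
        (fun st p => if PySem.Int.mod p.1 2 ≠ 0 then
            (PySem.List.pySetD st.1 p.2 "(", PySem.List.pySetD st.2 p.2 ")")
          else
            (PySem.List.pySetD st.1 p.2 ")", PySem.List.pySetD st.2 p.2 "(")) ab2
      [PySem.Str.join "" ab3.1, PySem.Str.join "" ab3.2]

-- ===== PRECONDITION & SPEC =====
-- Pre_ excludes exactly the inputs where A raises IndexError: the empty string (S[0]),
-- and N > len(S) when no early return (leading/trailing '0' or odd count of '1's) fires,
-- so that the main loop reads S[i] out of range.
def Pre_solve (N : Int) (S : String) : Prop :=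
  S.toList ≠ [] ∧
    (N ≤ (S.toList.length : Int) ∨ S.toList.headI = '0' ∨ S.toList.getLast? = some '0' ∨
      S.toList.count '1' % 2 = 1)
instance (N : Int) (S : String) : Decidable (Pre_solve N S) := by unfold Pre_solve; infer_instance
def pvWitness_solve : Int × String := (4, "1001")

def Spec_solve (N : Int) (S : String) (out : List String) : Prop := out = solve_alt N S
instance (N : Int) (S : String) (out : List String) : Decidable (Spec_solve N S out) := by
  unfold Spec_solve; infer_instance

-- ===== CLAIM (what is proved, stated in full; the proofs are below) =====
def Claim_equal_solve : Prop :=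
  ∀ (N : Int) (S : String), Dom_solve N S → Pre_solve N S → Spec_solve N S (solve N S)

-- ===== LEMMAS AND PROOFS =====
def onesI (l : List Char) : Int := (l.count '1' : Int)

-- the per-index characters A's loop emits
def aChar (L : List Char) (cnt : Int) (i : Int) : Char :=
  if PySem.List.pyGetD L i ' ' = '1' then
    (if onesI (L.take i.toNat) * 2 < cnt then '(' else ')')
  else
    (if (i - onesI (L.take i.toNat)) % 2 = 0 then ')' else '(')

def bChar (L : List Char) (cnt : Int) (i : Int) : Char :=
  if PySem.List.pyGetD L i ' ' = '1' then
    (if onesI (L.take i.toNat) * 2 < cnt then '(' else ')')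
  else
    (if (i - onesI (L.take i.toNat)) % 2 = 0 then '(' else ')')

theorem onesI_cons (c : Char) (l : List Char) :
    onesI (c :: l) = (if c = '1' then 1 else 0) + onesI l := by
  simp only [onesI, List.count_cons]
  by_cases h : c = '1' <;> simp [h] <;> ring

theorem foldl_cnt (l : List Char) (c0 : Int) :
    l.foldl (fun c s => if s = '1' then c + 1 else c) c0 = c0 + onesI l := by
  induction l generalizing c0 with
  | nil => simp [onesI]
  | cons c l ih =>
      rw [List.foldl_cons, ih, onesI_cons]
      by_cases h : c = '1' <;> simp [h] <;> ring

theorem sum_cnt (l : List Char) :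
    (l.map (fun c => if c = '1' then (1 : Int) else 0)).sum = onesI l := by
  induction l with
  | nil => simp [onesI]
  | cons c l ih => rw [List.map_cons, List.sum_cons, ih, onesI_cons]

theorem onesI_nonneg (l : List Char) : 0 ≤ onesI l := by simp [onesI]

theorem onesI_take_le (l : List Char) (n : Nat) : onesI (l.take n) ≤ n := by
  have h1 := List.count_le_length (l := l.take n) (a := '1')
  have h2 : (l.take n).length ≤ n := by simp
  simp only [onesI]
  omega

theorem pyGetD_cast (L : List Char) (n : Nat) (h : n < L.length) :
    PySem.List.pyGetD L ((n : Nat) : Int) ' ' = L[n] := by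
  rw [PySem.List.pyGetD_natCast]
  exact List.getD_eq_getElem L ' ' h

-- A's loop: running state and both output strings, characterized per index
theorem onesI_take_succ (l : List Char) (n : Nat) (h : n < l.length) :
    onesI (l.take (n + 1)) = onesI (l.take n) +
      (if PySem.List.pyGetD l ((n : Nat) : Int) ' ' = '1' then 1 else 0) := by
  have hsplit : l.take (n + 1) = l.take n ++ [l[n]] := by
    rw [← List.take_concat_get h, List.concat_eq_append]
  rw [hsplit, pyGetD_cast l n h]
  simp only [onesI, List.count_append]
  by_cases hc : l[n] = '1'
  · rw [hc]
    have h1 : List.count '1' ['1'] = 1 := rfl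
    rw [h1, if_pos rfl]; push_cast; ring
  · have h1 : List.count '1' [l[n]] = 0 := by simp [List.count_cons, hc]
    rw [h1, if_neg hc]; push_cast; ring

theorem loopA (L : List Char) (cnt : Int) (n : Nat) (hn : n ≤ L.length) :
    (PySem.List.pyRange 0 (n : Int) 1).foldl (solveStepA L cnt) (0, 0, [], []) =
      (onesI (L.take n),
       ((n : Int) - onesI (L.take n)) % 2,
       (PySem.List.pyRange 0 (n : Int) 1).map (aChar L cnt),
       (PySem.List.pyRange 0 (n : Int) 1).map (bChar L cnt)) := by
  induction n with
  | zero => simp [PySem.List.pyRange_one_eq_nil, onesI]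
  | succ n ih =>
      have hn' : n ≤ L.length := by omega
      have hcast : ((n + 1 : Nat) : Int) = (n : Int) + 1 := by push_cast; ring
      rw [hcast, PySem.List.pyRange_one_succ_right (Int.natCast_nonneg n)]
      rw [List.foldl_append, List.map_append, List.map_append, ih hn']
      simp only [List.foldl_cons, List.foldl_nil, List.map_cons, List.map_nil]
      have hle := onesI_take_le L n
      have hnn := onesI_nonneg (L.take n)
      rw [onesI_take_succ L n (by omega)]
      by_cases hc : PySem.List.pyGetD L ((n : Nat) : Int) ' ' = '1'
      all_goals simp only [PySem.List.pyGetD_natCast, List.getD_eq_getElem?_getD] at hc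
      · by_cases hlt : onesI (L.take n) * 2 < cnt
        · simp [solveStepA, aChar, bChar, hc, hlt, Int.toNat_natCast, Prod.ext_iff]
          try omega
        · simp [solveStepA, aChar, bChar, hc, hlt, Int.toNat_natCast, Prod.ext_iff]
          try omega
      · by_cases hp : ((n : Int) - onesI (L.take n)) % 2 = 0
        · simp [solveStepA, aChar, bChar, hc, hp, Int.toNat_natCast, Prod.ext_iff]
          try omega
        · simp [solveStepA, aChar, bChar, hc, hp, Int.toNat_natCast, Prod.ext_iff]
          try omega

-- ----- B side: gather lists and the generic scatter -----
def Fones (L : List Char) (n : Nat) : List Int :=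
  (PySem.List.pyRange 0 (n : Int) 1).filter (fun i => PySem.List.pyGetD L i ' ' == '1')

def Fzeros (L : List Char) (n : Nat) : List Int :=
  (PySem.List.pyRange 0 (n : Int) 1).filter (fun i => !(PySem.List.pyGetD L i ' ' == '1'))

def scat {β : Type} (idx : β → Int) (val : β → String) (init : List String) (l : List β) :
    List String :=
  l.foldl (fun a e => PySem.List.pySetD a (idx e) (val e)) init

theorem scat_length {β : Type} (idx : β → Int) (val : β → String) (init : List String)
    (l : List β) : (scat idx val init l).length = init.length := by
  induction l generalizing init with
  | nil => rfl
  | cons e l ih =>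
      show (scat idx val (PySem.List.pySetD init (idx e) (val e)) l).length = _
      rw [ih, PySem.List.length_pySetD]

theorem scat_get_no {β : Type} (idx : β → Int) (val : β → String) (init : List String)
    (l : List β) (p : Nat) (h : ∀ e ∈ l, 0 ≤ idx e ∧ idx e ≠ (p : Int)) :
    (scat idx val init l)[p]? = init[p]? := by
  induction l generalizing init with
  | nil => rfl
  | cons e l ih =>
      show (scat idx val (PySem.List.pySetD init (idx e) (val e)) l)[p]? = _
      rw [ih _ (fun e' he' => h e' (List.mem_cons_of_mem _ he'))]
      obtain ⟨h0, hne⟩ := h e (List.mem_cons_self ..)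
      rw [PySem.List.pySetD_of_nonneg _ _ h0]
      exact List.getElem?_set_ne (by omega)

theorem scat_pres {β : Type} (idx : β → Int) (val : β → String) (init : List String)
    (l : List β) (p : Nat) (v : String)
    (h : ∀ e ∈ l, 0 ≤ idx e ∧ (idx e = (p : Int) → val e = v))
    (h0 : init[p]? = some v) :
    (scat idx val init l)[p]? = some v := by
  induction l generalizing init with
  | nil => exact h0
  | cons e l ih =>
      show (scat idx val (PySem.List.pySetD init (idx e) (val e)) l)[p]? = _
      refine ih _ (fun e' he' => h e' (List.mem_cons_of_mem _ he')) ?_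
      obtain ⟨h0e, hv⟩ := h e (List.mem_cons_self ..)
      rw [PySem.List.pySetD_of_nonneg _ _ h0e]
      by_cases he : idx e = (p : Int)
      · obtain ⟨hp, -⟩ := List.getElem?_eq_some_iff.mp h0
        have ht : (idx e).toNat = p := by omega
        rw [ht, List.getElem?_set_self hp, hv he]
      · rw [List.getElem?_set_ne (by omega)]
        exact h0

theorem scat_write {β : Type} (idx : β → Int) (val : β → String) (init : List String)
    (l : List β) (p : Nat) (e : β) (he : e ∈ l) (hidx : idx e = (p : Int))
    (hv : ∀ e' ∈ l, 0 ≤ idx e' ∧ (idx e' = (p : Int) → val e' = val e))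
    (hp : p < init.length) :
    (scat idx val init l)[p]? = some (val e) := by
  obtain ⟨l₁, l₂, rfl⟩ := List.append_of_mem he
  unfold scat
  rw [List.foldl_append, List.foldl_cons]
  refine scat_pres idx val _ l₂ p (val e)
    (fun e' he' => hv e' (by simp [List.mem_append, he'])) ?_
  have hlen : (List.foldl (fun a e => PySem.List.pySetD a (idx e) (val e)) init l₁).length
      = init.length := scat_length idx val init l₁
  have h0e : (0 : Int) ≤ idx e := by omega
  rw [PySem.List.pySetD_of_nonneg _ _ h0e]
  have ht : (idx e).toNat = p := by omega
  rw [ht]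
  exact List.getElem?_set_self (by omega)

-- structural facts about the gathered index lists
theorem Fones_succ (L : List Char) (n : Nat) :
    Fones L (n + 1) = Fones L n ++
      (if PySem.List.pyGetD L ((n : Nat) : Int) ' ' = '1' then [(n : Int)] else []) := by
  unfold Fones
  have hcast : ((n + 1 : Nat) : Int) = (n : Int) + 1 := by push_cast; ring
  rw [hcast, PySem.List.pyRange_one_succ_right (Int.natCast_nonneg n), List.filter_append]
  congr 1
  rw [List.filter_cons]
  by_cases hc : PySem.List.pyGetD L ((n : Nat) : Int) ' ' = '1' <;> simp [hc]

theorem Fzeros_succ (L : List Char) (n : Nat) :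
    Fzeros L (n + 1) = Fzeros L n ++
      (if PySem.List.pyGetD L ((n : Nat) : Int) ' ' = '1' then [] else [(n : Int)]) := by
  unfold Fzeros
  have hcast : ((n + 1 : Nat) : Int) = (n : Int) + 1 := by push_cast; ring
  rw [hcast, PySem.List.pyRange_one_succ_right (Int.natCast_nonneg n), List.filter_append]
  congr 1
  rw [List.filter_cons]
  by_cases hc : PySem.List.pyGetD L ((n : Nat) : Int) ' ' = '1' <;> simp [hc]

theorem len_Fones (L : List Char) (n : Nat) (hn : n ≤ L.length) :
    ((Fones L n).length : Int) = onesI (L.take n) := by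
  induction n with
  | zero => simp [Fones, PySem.List.pyRange_one_eq_nil, onesI]
  | succ n ih =>
      rw [Fones_succ L n, List.length_append, onesI_take_succ L n (by omega)]
      have := ih (by omega)
      by_cases hc : PySem.List.pyGetD L ((n : Nat) : Int) ' ' = '1' <;>
        simp only [hc, reduceIte] <;> simp <;> omega

theorem len_Fzeros (L : List Char) (n : Nat) (hn : n ≤ L.length) :
    ((Fzeros L n).length : Int) = (n : Int) - onesI (L.take n) := by
  induction n with
  | zero => simp [Fzeros, PySem.List.pyRange_one_eq_nil, onesI]
  | succ n ih =>
      rw [Fzeros_succ L n, List.length_append, onesI_take_succ L n (by omega)]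
      have := ih (by omega)
      by_cases hc : PySem.List.pyGetD L ((n : Nat) : Int) ' ' = '1' <;>
        simp only [hc, reduceIte] <;> simp <;> omega

theorem Fones_range (L : List Char) (n : Nat) (i : Int) (hi : i ∈ Fones L n) :
    0 ≤ i ∧ i < (n : Int) := by
  have := (List.mem_filter.mp hi).1
  exact PySem.List.mem_pyRange_one.mp this

theorem mem_Fones_take (L : List Char) (n : Nat) (hn : n ≤ L.length) (m p : Nat) :
    ((p : Int) ∈ (Fones L n).take m) ↔
      (p < n ∧ PySem.List.pyGetD L ((p : Nat) : Int) ' ' = '1' ∧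
        onesI (L.take p) < (m : Int)) := by
  induction n with
  | zero => simp [Fones, PySem.List.pyRange_one_eq_nil]
  | succ n ih =>
      rw [Fones_succ L n, List.take_append, List.mem_append, ih (by omega)]
      have hlen : ((Fones L n).length : Int) = onesI (L.take n) := len_Fones L n (by omega)
      by_cases hc : PySem.List.pyGetD L ((n : Nat) : Int) ' ' = '1'
      · simp only [hc, reduceIte]
        constructor
        · rintro (⟨h1, h2, h3⟩ | hmem)
          · exact ⟨by omega, h2, h3⟩
          · have h0 : 0 < m - (Fones L n).length := by
              by_contra h
              rw [Nat.le_zero.mp (by omega : m - (Fones L n).length ≤ 0)] at hmem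
              simp at hmem
            rw [List.take_of_length_le (by simp; omega)] at hmem
            have hpn : p = n := by exact_mod_cast List.mem_singleton.mp hmem
            subst hpn
            exact ⟨by omega, hc, by omega⟩
        · rintro ⟨h1, h2, h3⟩
          by_cases hpn : p = n
          · subst hpn
            right
            rw [List.take_of_length_le (by simp; omega)]
            simp
          · left
            exact ⟨by omega, h2, by omega⟩
      · simp only [hc, reduceIte]
        constructor
        · rintro (⟨h1, h2, h3⟩ | hmem)
          · exact ⟨by omega, h2, h3⟩
          · simp at hmem
        · rintro ⟨h1, h2, h3⟩
          by_cases hpn : p = n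
          · subst hpn
            exact absurd h2 hc
          · left; exact ⟨by omega, h2, h3⟩

theorem mem_Fones_drop (L : List Char) (n : Nat) (hn : n ≤ L.length) (m p : Nat) :
    ((p : Int) ∈ (Fones L n).drop m) ↔
      (p < n ∧ PySem.List.pyGetD L ((p : Nat) : Int) ' ' = '1' ∧
        (m : Int) ≤ onesI (L.take p)) := by
  induction n with
  | zero => simp [Fones, PySem.List.pyRange_one_eq_nil]
  | succ n ih =>
      rw [Fones_succ L n, List.drop_append, List.mem_append, ih (by omega)]
      have hlen : ((Fones L n).length : Int) = onesI (L.take n) := len_Fones L n (by omega)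
      have hle := onesI_take_le L p
      by_cases hc : PySem.List.pyGetD L ((n : Nat) : Int) ' ' = '1'
      · simp only [hc, reduceIte]
        constructor
        · rintro (⟨h1, h2, h3⟩ | hmem)
          · exact ⟨by omega, h2, h3⟩
          · have h0 : m - (Fones L n).length = 0 := by
              by_contra h
              rcases Nat.exists_eq_succ_of_ne_zero h with ⟨k, hk⟩
              rw [hk] at hmem
              simp at hmem
            rw [h0, List.drop_zero] at hmem
            have hpn : p = n := by exact_mod_cast List.mem_singleton.mp hmem
            subst hpn
            exact ⟨by omega, hc, by omega⟩
        · rintro ⟨h1, h2, h3⟩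
          by_cases hpn : p = n
          · right
            have h0 : m - (Fones L n).length = 0 := by
              rw [hpn] at h3
              omega
            rw [h0, List.drop_zero, hpn]
            simp
          · left
            exact ⟨by omega, h2, h3⟩
      · simp only [hc, reduceIte]
        constructor
        · rintro (⟨h1, h2, h3⟩ | hmem)
          · exact ⟨by omega, h2, h3⟩
          · simp at hmem
        · rintro ⟨h1, h2, h3⟩
          by_cases hpn : p = n
          · subst hpn
            exact absurd h2 hc
          · left; exact ⟨by omega, h2, h3⟩

theorem mem_Fzeros_enum (L : List Char) (n : Nat) (hn : n ≤ L.length) (e : Int × Int) :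
    e ∈ PySem.List.enumerate (Fzeros L n) 0 ↔
      ∃ p : Nat, p < n ∧ ¬ PySem.List.pyGetD L ((p : Nat) : Int) ' ' = '1' ∧
        e = ((p : Int) - onesI (L.take p), (p : Int)) := by
  induction n with
  | zero =>
      simp [Fzeros, PySem.List.pyRange_one_eq_nil, PySem.List.enumerate]
  | succ n ih =>
      rw [Fzeros_succ L n, PySem.List.enumerate_append, List.mem_append, ih (by omega)]
      have hlen : ((Fzeros L n).length : Int) = (n : Int) - onesI (L.take n) :=
        len_Fzeros L n (by omega)
      by_cases hc : PySem.List.pyGetD L ((n : Nat) : Int) ' ' = '1'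
      · simp only [hc, reduceIte]
        constructor
        · rintro (⟨p, h1, h2, h3⟩ | hmem)
          · exact ⟨p, by omega, h2, h3⟩
          · simp [PySem.List.enumerate] at hmem
        · rintro ⟨p, h1, h2, h3⟩
          by_cases hpn : p = n
          · subst hpn
            exact absurd hc h2
          · left; exact ⟨p, by omega, h2, h3⟩
      · simp only [hc, reduceIte]
        have henum : PySem.List.enumerate [((n : Nat) : Int)]
            (0 + ((Fzeros L n).length : Int)) =
            [(((Fzeros L n).length : Int), ((n : Nat) : Int))] := by
          simp [PySem.List.enumerate]
        rw [henum, List.mem_singleton]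
        constructor
        · rintro (⟨p, h1, h2, h3⟩ | heq)
          · exact ⟨p, by omega, h2, h3⟩
          · exact ⟨n, by omega, hc, by rw [heq, hlen]⟩
        · rintro ⟨p, h1, h2, h3⟩
          by_cases hpn : p = n
          · subst hpn; right; rw [h3, hlen]
          · left; exact ⟨p, by omega, h2, h3⟩

-- the scatter pipeline produces exactly the per-index characters, as singleton strings
theorem scat3_eq_map (L : List Char) (n : Nat) (hn : n ≤ L.length) (C : Nat)
    (hC : (C : Int) = onesI L) (hCe : C % 2 = 0) (u v : String) (w x : Char)
    (hu : u = String.ofList [w]) (hv : v = String.ofList [x]) :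
    scat (fun p : Int × Int => p.2)
        (fun p => if PySem.Int.mod p.1 2 ≠ 0 then u else v)
        (scat (fun i : Int => i) (fun _ => ")")
          (scat (fun i : Int => i) (fun _ => "(")
            (List.replicate n "") ((Fones L n).take (C / 2)))
          ((Fones L n).drop (C / 2)))
        (PySem.List.enumerate (Fzeros L n) 0)
      = (PySem.List.pyRange 0 (n : Int) 1).map (fun i =>
          String.ofList [if PySem.List.pyGetD L i ' ' = '1' then
              (if onesI (L.take i.toNat) * 2 < (C : Int) then '(' else ')')
            else
              (if (i - onesI (L.take i.toNat)) % 2 = 0 then x else w)]) := by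
  have hlen1 : (scat (fun i : Int => i) (fun _ => "(")
      (List.replicate n "") ((Fones L n).take (C / 2))).length = n := by
    rw [scat_length, List.length_replicate]
  have hlen2 : (scat (fun i : Int => i) (fun _ => ")")
      (scat (fun i : Int => i) (fun _ => "(")
        (List.replicate n "") ((Fones L n).take (C / 2)))
      ((Fones L n).drop (C / 2))).length = n := by
    rw [scat_length, hlen1]
  have hlen3 : (scat (fun p : Int × Int => p.2)
      (fun p => if PySem.Int.mod p.1 2 ≠ 0 then u else v)
      (scat (fun i : Int => i) (fun _ => ")")
        (scat (fun i : Int => i) (fun _ => "(")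
          (List.replicate n "") ((Fones L n).take (C / 2)))
        ((Fones L n).drop (C / 2)))
      (PySem.List.enumerate (Fzeros L n) 0)).length = n := by
    rw [scat_length, hlen2]
  apply List.ext_getElem?
  intro p
  by_cases hp : p < n
  · rw [PySem.List.getElem?_map_pyRange_zero _ n p hp]
    have hcB_le := onesI_take_le L p
    have hcB_nn := onesI_nonneg (L.take p)
    have htn : (((p : Nat) : Int)).toNat = p := Int.toNat_natCast p
    by_cases hc : PySem.List.pyGetD L ((p : Nat) : Int) ' ' = '1'
    · -- '1' position: written by phase 1 or 2, untouched by phase 3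
      rw [scat_get_no _ _ _ _ p ?hz3]
      case hz3 =>
        rintro e he
        obtain ⟨q, hq1, hq2, hq3⟩ := (mem_Fzeros_enum L n hn e).mp he
        subst hq3
        refine ⟨Int.natCast_nonneg q, ?_⟩
        intro habs
        simp only at habs
        have : q = p := by exact_mod_cast habs
        subst this
        exact hq2 hc
      by_cases h2 : onesI (L.take p) * 2 < (C : Int)
      · -- phase 2 skips, phase 1 wrote "("
        have h2' : onesI (L.take p) < ((C / 2 : Nat) : Int) := by omega
        rw [scat_get_no _ _ _ _ p ?hd]
        case hd =>
          intro i hi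
          have hr := Fones_range L n i (List.mem_of_mem_drop hi)
          refine ⟨hr.1, ?_⟩
          intro habs
          subst habs
          have := (mem_Fones_drop L n hn (C / 2) p).mp hi
          omega
        rw [scat_write (fun i : Int => i) (fun _ => "(") _ _ p ((p : Nat) : Int)
          ((mem_Fones_take L n hn (C / 2) p).mpr ⟨hp, hc, h2'⟩)
          rfl
          (fun i hi => ⟨(Fones_range L n i (List.mem_of_mem_take hi)).1, fun _ => rfl⟩)
          (by rw [List.length_replicate]; omega)]
        rw [htn, if_pos hc, if_pos h2]
      · -- phase 2 wrote ")"
        have h2' : ((C / 2 : Nat) : Int) ≤ onesI (L.take p) := by omega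
        rw [scat_write (fun i : Int => i) (fun _ => ")") _ _ p ((p : Nat) : Int)
          ((mem_Fones_drop L n hn (C / 2) p).mpr ⟨hp, hc, h2'⟩)
          rfl
          (fun i hi => ⟨(Fones_range L n i (List.mem_of_mem_drop hi)).1, fun _ => rfl⟩)
          (by omega)]
        rw [htn, if_pos hc, if_neg h2]
    · -- non-'1' position: written by phase 3
      have hmem : (((p : Nat) : Int) - onesI (L.take p), ((p : Nat) : Int)) ∈
          PySem.List.enumerate (Fzeros L n) 0 :=
        (mem_Fzeros_enum L n hn _).mpr ⟨p, hp, hc, rfl⟩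
      rw [scat_write _ _ _ _ p _ hmem rfl ?hv2 (by omega)]
      case hv2 =>
        rintro e' he'
        obtain ⟨q, hq1, hq2, hq3⟩ := (mem_Fzeros_enum L n hn e').mp he'
        subst hq3
        refine ⟨Int.natCast_nonneg q, ?_⟩
        intro habs
        simp only at habs
        have : q = p := by exact_mod_cast habs
        subst this
        rfl
      have hmodc : PySem.Int.mod (((p : Nat) : Int) - onesI (L.take p)) 2 =
          (((p : Nat) : Int) - onesI (L.take p)) % 2 :=
        PySem.Int.mod_eq_emod_of_pos (by norm_num)
      by_cases hpar : (((p : Nat) : Int) - onesI (L.take p)) % 2 = 0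
      · have hcond : ¬ (PySem.Int.mod (((p : Nat) : Int) - onesI (L.take p)) 2 ≠ 0) := by
          rw [hmodc, hpar]; simp
        show some (if PySem.Int.mod (((p : Nat) : Int) - onesI (L.take p)) 2 ≠ 0
            then u else v) = _
        rw [if_neg hcond, htn, if_neg hc, if_pos hpar, hv]
      · have hcond : PySem.Int.mod (((p : Nat) : Int) - onesI (L.take p)) 2 ≠ 0 := by
          rw [hmodc]; exact hpar
        show some (if PySem.Int.mod (((p : Nat) : Int) - onesI (L.take p)) 2 ≠ 0
            then u else v) = _
        rw [if_pos hcond, htn, if_neg hc, if_neg hpar, hu]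
  · rw [List.getElem?_eq_none (by rw [hlen3]; omega),
      List.getElem?_eq_none (by
        rw [List.length_map, PySem.List.length_pyRange_one]
        omega)]

-- join of singleton strings
theorem join_singletons (g : Int → Char) (l : List Int) :
    PySem.Str.join "" (l.map (fun i => String.ofList [g i])) = String.ofList (l.map g) := by
  apply String.toList_inj.mp
  rw [PySem.Str.toList_join]
  simp only [List.map_map]
  have h1 : (List.map (String.toList ∘ fun i => String.ofList [g i]) l) =
      (l.map g).map (fun c => [c]) := by
    simp [Function.comp]
  rw [h1]
  have h2 := PySem.Chars.join_nil_singletons (cs := l.map g)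
  simp at h2 ⊢
  exact h2

-- ===== VERDICT (by name: the statement is the Claim_ definition above) =====
-- commute an `if` with a pair, so the two-array loops split into independent scatters
theorem step3_split (u₁ v₁ u₂ v₂ : String) :
    (fun (st : List String × List String) (p : Int × Int) =>
        if PySem.Int.mod p.1 2 ≠ 0 then
          (PySem.List.pySetD st.1 p.2 u₁, PySem.List.pySetD st.2 p.2 u₂)
        else
          (PySem.List.pySetD st.1 p.2 v₁, PySem.List.pySetD st.2 p.2 v₂)) =
      (fun st p =>
        ((fun a (e : Int × Int) =>
            PySem.List.pySetD a e.2 (if PySem.Int.mod e.1 2 ≠ 0 then u₁ else v₁)) st.1 p,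
         (fun a (e : Int × Int) =>
            PySem.List.pySetD a e.2 (if PySem.Int.mod e.1 2 ≠ 0 then u₂ else v₂)) st.2 p)) := by
  funext st p
  show _ = (PySem.List.pySetD st.1 p.2 (if PySem.Int.mod p.1 2 ≠ 0 then u₁ else v₁),
            PySem.List.pySetD st.2 p.2 (if PySem.Int.mod p.1 2 ≠ 0 then u₂ else v₂))
  by_cases h : PySem.Int.mod p.1 2 ≠ 0
  · rw [if_pos h, if_pos h, if_pos h]
  · rw [if_neg h, if_neg h, if_neg h]

theorem solve_spec : Claim_equal_solve := by
  intro N S hdom hpre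
  obtain ⟨hne, hdisj⟩ := hpre
  unfold Spec_solve solve solve_alt
  simp only [foldl_cnt, sum_cnt, zero_add]
  split_ifs with hg hodd hcn
  · rfl
  · rfl
  · rfl
  · have hN : N ≤ (S.toList.length : Int) := by
      rcases hdisj with h | h | h | h
      · exact h
      · exfalso; apply hg; left
        cases hL : S.toList with
        | nil => exact absurd hL hne
        | cons c t =>
            rw [hL] at h
            simp only [List.headI] at h
            simp [PySem.Str.pyGet?, hL, PySem.List.pyGet?_zero, h]
      · exfalso; apply hg; right
        simp [PySem.Str.pyGet?, PySem.List.pyGet?_neg_one, h]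
      · exfalso; apply hodd
        rw [PySem.Int.mod_eq_emod_of_pos (by norm_num)]
        simp only [onesI]
        omega
    by_cases hN0 : N < 0
    · rw [PySem.List.pyRange_one_eq_nil (by omega)]
      have hrep : PySem.List.pyRepeat ([""] : List String) N = [] := by
        rw [PySem.List.pyRepeat_singleton]
        simp [Int.toNat_of_nonpos (by omega : N ≤ 0)]
      simp [PySem.List.enumerate, hrep, PySem.List.slice] <;> rfl
    · push_neg at hN0
      obtain ⟨n, rfl⟩ : ∃ n : Nat, N = (n : Int) := ⟨N.toNat, (Int.toNat_of_nonneg hN0).symm⟩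
      have hn : n ≤ S.toList.length := by exact_mod_cast hN
      set L := S.toList with hL
      set C : Nat := L.count '1' with hCdef
      have honesC : onesI L = (C : Int) := rfl
      have hCe : C % 2 = 0 := by
        rw [honesC] at hodd
        rw [PySem.Int.mod_eq_emod_of_pos (by norm_num)] at hodd
        omega
      -- A side
      rw [loopA L (onesI L) n hn]
      -- B side
      have hflo : PySem.Int.floordiv (onesI L) 2 = ((C / 2 : Nat) : Int) := by
        rw [honesC]
        have h2 : (2 : Int) = ((2 : Nat) : Int) := rfl
        rw [h2, PySem.Int.floordiv_natCast]
      rw [hflo]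
      have hrep : PySem.List.pyRepeat ([""] : List String) ((n : Nat) : Int) =
          List.replicate n "" := by
        rw [PySem.List.pyRepeat_singleton]
        simp
      rw [hrep]
      rw [PySem.List.slice_to _ (Int.natCast_nonneg (C / 2)),
        PySem.List.slice_from _ (Int.natCast_nonneg (C / 2))]
      rw [Int.toNat_natCast]
      rw [PySem.List.foldl_prod_mk (f := fun a (i : Int) => PySem.List.pySetD a i "(")
        (g := fun a (i : Int) => PySem.List.pySetD a i "(")]
      rw [PySem.List.foldl_prod_mk (f := fun a (i : Int) => PySem.List.pySetD a i ")")
        (g := fun a (i : Int) => PySem.List.pySetD a i ")")]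
      rw [step3_split]
      rw [PySem.List.foldl_prod_mk
        (f := fun a (e : Int × Int) =>
          PySem.List.pySetD a e.2 (if PySem.Int.mod e.1 2 ≠ 0 then "(" else ")"))
        (g := fun a (e : Int × Int) =>
          PySem.List.pySetD a e.2 (if PySem.Int.mod e.1 2 ≠ 0 then ")" else "("))]
      have hFo : (PySem.List.pyRange 0 ((n : Nat) : Int) 1).filter
          (fun i => PySem.List.pyGetD L i ' ' == '1') = Fones L n := rfl
      have hFz : (PySem.List.pyRange 0 ((n : Nat) : Int) 1).filter
          (fun i => !(PySem.List.pyGetD L i ' ' == '1')) = Fzeros L n := rfl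
      rw [hFo, hFz]
      have ha := scat3_eq_map L n hn C rfl hCe "(" ")" '(' ')' rfl rfl
      have hb := scat3_eq_map L n hn C rfl hCe ")" "(" ')' '(' rfl rfl
      unfold scat at ha hb
      rw [ha, hb, honesC, join_singletons, join_singletons]
      rfl
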